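-- pv_equiv track=rewrite | github.com/TCChris205/AIConnect | MainProject/dataParser.py | split_description_and_clues
-- ===== SOURCE A (Python) =====
-- def split_description_and_clues(text: str):
--     """
--     Takes the full puzzle string.
--     Splits into:
--     - desc_text: everything before '## Clues'
--     - clue_lines: non-empty lines in the clues section
--     """
--     lines = text.splitlines()
--     desc_lines = []
--     clue_lines = []
--     in_clues = False
--
--     for line in lines:
--         stripped = line.strip()
--         if not in_clues:
--             if "Clues:" in stripped:
--                 in_clues = True
--             else:
--                 desc_lines.append(line)
--         else:
--             if stripped:  # skip empty lines
--                 clue_lines.append(line.rstrip("\n"))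
--
--     return "\n".join(desc_lines), clue_lines
-- ===== SOURCE B (Python) =====
-- def split_description_and_clues(text: str):
--     """
--     Takes the full puzzle string.
--     Splits into:
--     - desc_text: everything before '## Clues'
--     - clue_lines: non-empty lines in the clues section
--     """
--     lines = text.splitlines()
--     idx = next((i for i, l in enumerate(lines) if "Clues:" in l.strip()), None)
--     if idx is None:
--         return "\n".join(lines), []
--     return "\n".join(lines[:idx]), [l for l in lines[idx + 1:] if l.strip()]
-- ===== Notes on version B (the rewrite author's own statement) =====
-- stated objective: simpler
-- what changed: Replaces the flag-threaded single pass that appends into two accumulators with a find-the-split-point decomposition: locate the first 'Clues:' line, then take the prefix as the description and filter the non-empty lines of the suffix as clues.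
import Mathlib
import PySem

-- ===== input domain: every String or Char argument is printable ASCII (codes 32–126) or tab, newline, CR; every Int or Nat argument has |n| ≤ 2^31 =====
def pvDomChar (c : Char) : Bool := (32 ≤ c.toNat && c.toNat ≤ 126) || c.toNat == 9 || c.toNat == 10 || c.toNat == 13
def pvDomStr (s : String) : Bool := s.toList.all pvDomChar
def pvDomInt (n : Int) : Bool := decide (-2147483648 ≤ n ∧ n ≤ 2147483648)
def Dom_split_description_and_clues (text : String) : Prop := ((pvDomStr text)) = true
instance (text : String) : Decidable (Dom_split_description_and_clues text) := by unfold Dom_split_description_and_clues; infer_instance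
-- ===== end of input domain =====

-- B replaces A's flag-threaded single pass with a find-the-split-point-then-partition decomposition (objective: simpler).

-- ===== PORT A =====

-- line.rstrip("\n"): drop every trailing '\n'; hand-ported (PySem has no rstrip-with-chars), exact.
def pvRstripNl (s : String) : String :=
  String.ofList ((s.toList.reverse.dropWhile (fun c => c == '\n')).reverse)

-- A's for-loop over the lines, threading (desc_lines, clue_lines, in_clues).
def pvLoopA (lines : List String) (desc clues : List String) (inClues : Bool) :
    List String × List String :=
  match lines with
  | [] => (desc, clues)
  | line :: rest =>
    let stripped := PySem.Str.strip line
    if inClues = false then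
      if PySem.Str.isIn "Clues:" stripped then
        pvLoopA rest desc clues true
      else
        pvLoopA rest (desc ++ [line]) clues inClues
    else
      if stripped ≠ "" then
        pvLoopA rest desc (clues ++ [pvRstripNl line]) inClues
      else
        pvLoopA rest desc clues inClues

def split_description_and_clues (text : String) : String × List String :=
  let lines := PySem.Str.splitlines text
  let res := pvLoopA lines [] [] false
  (PySem.Str.join "\n" res.1, res.2)

-- ===== PORT B =====
-- lines[:idx] / lines[idx+1:] with idx a valid non-negative index are List.take / List.drop.
def split_description_and_clues_alt (text : String) : String × List String :=
  let lines := PySem.Str.splitlines text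
  match lines.findIdx? (fun l => PySem.Str.isIn "Clues:" (PySem.Str.strip l)) with
  | none => (PySem.Str.join "\n" lines, [])
  | some i =>
    (PySem.Str.join "\n" (lines.take i),
     (lines.drop (i + 1)).filter (fun l => PySem.Str.strip l ≠ ""))

-- ===== PRECONDITION & SPEC =====
def Spec_split_description_and_clues (text : String) (out : String × List String) : Prop := out = split_description_and_clues_alt text
instance (text : String) (out : String × List String) : Decidable (Spec_split_description_and_clues text out) := by unfold Spec_split_description_and_clues; infer_instance

-- ===== CLAIM (what is proved, stated in full; the proofs are below) =====
def Claim_equal_split_description_and_clues : Prop := ∀ (text : String), Dom_split_description_and_clues text → Spec_split_description_and_clues text (split_description_and_clues text)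

-- ===== LEMMAS AND PROOFS =====

-- no line produced by splitlines contains '\n'
lemma no_nl_splitlines_go (isB : Char → Bool) (hB : isB '\n' = true)
    (cs cur : List Char) (acc : List (List Char)) :
    '\n' ∉ cur → (∀ l ∈ acc, '\n' ∉ l) →
    ∀ l ∈ PySem.Chars.splitlines.go isB cs cur acc, '\n' ∉ l := by
  fun_induction PySem.Chars.splitlines.go isB cs cur acc with
  | case1 cur acc h =>
    intro hcur hacc l hl
    exact hacc l (List.mem_reverse.mp hl)
  | case2 cur acc h =>
    intro hcur hacc l hl
    rw [List.mem_reverse, List.mem_cons] at hl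
    rcases hl with rfl | hl
    · simpa using hcur
    · exact hacc l hl
  | case3 rest cur acc ih =>
    intro hcur hacc
    refine ih (by simp) ?_
    intro l hl
    rcases List.mem_cons.mp hl with rfl | hl
    · simpa using hcur
    · exact hacc l hl
  | case4 c rest cur acc hx h ih =>
    intro hcur hacc
    refine ih (by simp) ?_
    intro l hl
    rcases List.mem_cons.mp hl with rfl | hl
    · simpa using hcur
    · exact hacc l hl
  | case5 c rest cur acc hx h ih =>
    intro hcur hacc
    refine ih ?_ hacc
    intro hmem
    rcases List.mem_cons.mp hmem with rfl | hmem
    · exact h hB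
    · exact hcur hmem

lemma no_nl_splitlines (s : String) :
    ∀ l ∈ PySem.Str.splitlines s, '\n' ∉ l.toList := by
  intro l hl
  simp only [PySem.Str.splitlines, List.mem_map] at hl
  obtain ⟨cl, hcl, rfl⟩ := hl
  rw [String.toList_ofList]
  unfold PySem.Chars.splitlines at hcl
  exact no_nl_splitlines_go _ (by decide) _ _ _ (by simp) (by simp) cl hcl

lemma pvRstripNl_of_no_nl (s : String) (h : '\n' ∉ s.toList) : pvRstripNl s = s := by
  unfold pvRstripNl
  have hd : s.toList.reverse.dropWhile (fun c => c == '\n') = s.toList.reverse := by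
    cases hr : s.toList.reverse with
    | nil => rfl
    | cons a t =>
      have ha : a ∈ s.toList := by
        rw [← List.mem_reverse, hr]; simp
      have hne : a ≠ '\n' := fun hd => h (hd ▸ ha)
      simp [hne]
  rw [hd, List.reverse_reverse, String.ofList_toList]

-- after the marker: the loop collects exactly the non-blank lines
lemma pvLoopA_true (lines desc clues : List String)
    (hnl : ∀ l ∈ lines, '\n' ∉ l.toList) :
    pvLoopA lines desc clues true =
      (desc, clues ++ lines.filter (fun l => PySem.Str.strip l ≠ "")) := by
  induction lines generalizing clues with
  | nil => simp [pvLoopA]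
  | cons line rest ih =>
    have hline := hnl line (by simp)
    have hrest : ∀ l ∈ rest, '\n' ∉ l.toList := fun l hl => hnl l (by simp [hl])
    by_cases h : PySem.Str.strip line = ""
    · simp [pvLoopA, h, ih _ hrest]
    · simp [pvLoopA, h, ih _ hrest, pvRstripNl_of_no_nl line hline]

-- before the marker: the loop equals B's find-the-split-point decomposition
lemma pvLoopA_false (lines desc clues : List String)
    (hnl : ∀ l ∈ lines, '\n' ∉ l.toList) :
    pvLoopA lines desc clues false =
      match lines.findIdx? (fun l => PySem.Str.isIn "Clues:" (PySem.Str.strip l)) with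
      | none => (desc ++ lines, clues)
      | some i => (desc ++ lines.take i,
          clues ++ (lines.drop (i + 1)).filter (fun l => PySem.Str.strip l ≠ "")) := by
  induction lines generalizing desc with
  | nil => simp [pvLoopA]
  | cons line rest ih =>
    have hrest : ∀ l ∈ rest, '\n' ∉ l.toList := fun l hl => hnl l (by simp [hl])
    rw [List.findIdx?_cons]
    by_cases h : PySem.Str.isIn "Clues:" (PySem.Str.strip line) = true
    · simp only [h, if_pos]
      simp only [pvLoopA, h, if_true]
      rw [pvLoopA_true rest desc clues hrest]
      simp
    · simp only [h]
      simp only [pvLoopA, h, Bool.false_eq_true, if_false]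
      rw [ih (desc ++ [line]) hrest]
      cases hf : rest.findIdx? (fun l => PySem.Str.isIn "Clues:" (PySem.Str.strip l)) with
      | none => simp
      | some i => simp [List.take_succ_cons, List.drop_succ_cons]

-- ===== VERDICT (by name: the statement is the Claim_ definition above) =====
theorem split_description_and_clues_spec : Claim_equal_split_description_and_clues := by
  intro text _
  unfold Spec_split_description_and_clues split_description_and_clues split_description_and_clues_alt
  simp only
  rw [pvLoopA_false _ _ _ (no_nl_splitlines text)]
  cases h : (PySem.Str.splitlines text).findIdx? (fun l => PySem.Str.isIn "Clues:" (PySem.Str.strip l)) with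
  | none => simp
  | some i => simp
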